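-- pv_equiv track=rewrite | github.com/blackorbit1/DeltaTwinsEnzo | data/generation.py | generatePattern2
-- ===== SOURCE A (Python) =====
-- def generatePattern2(largeur, hauteur, pattern):
--     res = ""
--     for i in range(largeur):
--         noeud = 0
--         for j in range(hauteur):
--             for lettre in pattern[i % len(pattern)]:
--                 if lettre == "x":
--                     res += str(noeud) + " " + str(noeud + 1) + " " + str(i) + "\n"
--                     noeud += 2
--                 else:
--                     noeud += 1
--     return res
-- ===== SOURCE B (Python) =====
-- def generatePattern2(largeur, hauteur, pattern):
--     lines = []
--     for i in range(largeur):
--         row = pattern[i % len(pattern)]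
--         offs = []
--         total = 0
--         for c in row:
--             if c == "x":
--                 offs.append(total)
--                 total += 2
--             else:
--                 total += 1
--         for j in range(hauteur):
--             base = j * total
--             for off in offs:
--                 lines.append(str(base + off) + " " + str(base + off + 1) + " " + str(i) + "\n")
--     return "".join(lines)
-- ===== Notes on version B (the rewrite author's own statement) =====
-- stated objective: alternative
-- what changed: B scans each pattern row once to precompute the x-offsets and the per-pass node increment, then emits each line arithmetically as base = j*total plus offset into a list joined once, instead of A's rescanning the row hauteur times while threading a running noeud counter through string concatenation.
-- outside the precondition, e.g. on generatePattern2(2, 0, []): A returns '', B raises ZeroDivisionError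
import Mathlib
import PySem

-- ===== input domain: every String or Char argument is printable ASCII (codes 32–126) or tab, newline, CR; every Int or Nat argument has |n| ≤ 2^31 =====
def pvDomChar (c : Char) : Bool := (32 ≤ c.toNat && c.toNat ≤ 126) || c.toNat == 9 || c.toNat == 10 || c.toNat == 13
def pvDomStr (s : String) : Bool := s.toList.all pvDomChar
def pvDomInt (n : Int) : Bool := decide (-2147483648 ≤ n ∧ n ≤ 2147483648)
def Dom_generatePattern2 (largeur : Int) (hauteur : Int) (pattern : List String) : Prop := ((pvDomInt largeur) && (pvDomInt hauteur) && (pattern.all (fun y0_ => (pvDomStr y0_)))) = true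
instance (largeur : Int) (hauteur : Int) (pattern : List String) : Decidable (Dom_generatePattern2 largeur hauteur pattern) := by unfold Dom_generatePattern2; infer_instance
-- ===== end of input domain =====

-- B precomputes each row's x-offsets and per-pass increment once and emits lines as base+offset
-- arithmetic into a list joined at the end, instead of A's per-pass rescans with a running counter.
-- Strings are modelled as List Char (exact: Python str concatenation = list append) and packed with String.ofList.

-- ===== PORT A =====
-- one inner-loop character step: (res, noeud) state, literal string building as in A
def gpA_char (i : Int) (st : List Char × Int) (c : Char) : List Char × Int :=
  if c = 'x' then
    (st.1 ++ (PySem.Int.toChars st.2 ++ [' '] ++ PySem.Int.toChars (st.2 + 1) ++ [' '] ++ PySem.Int.toChars i ++ ['\n']), st.2 + 2)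
  else (st.1, st.2 + 1)

def generatePattern2 (largeur : Int) (hauteur : Int) (pattern : List String) : String :=
  String.ofList
    ((PySem.List.pyRange 0 largeur 1).foldl (fun res i =>
        ((PySem.List.pyRange 0 hauteur 1).foldl (fun st (_ : Int) =>
            (((PySem.List.pyGet? pattern (PySem.Int.mod i (pattern.length : Int))).getD "").toList).foldl
              (gpA_char i) st)
          (res, (0 : Int))).1)
      [])

-- ===== PORT B =====
def gpB_line (i : Int) (base : Int) : List Char :=
  PySem.Int.toChars base ++ [' '] ++ PySem.Int.toChars (base + 1) ++ [' '] ++ PySem.Int.toChars i ++ ['\n']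

-- one scan of the row: list of x-offsets and the row's total increment
def gpB_scan (row : List Char) : List Int × Int :=
  row.foldl (fun st c => if c = 'x' then (st.1 ++ [st.2], st.2 + 2) else (st.1, st.2 + 1)) ([], 0)

def generatePattern2_alt (largeur : Int) (hauteur : Int) (pattern : List String) : String :=
  String.ofList
    (((PySem.List.pyRange 0 largeur 1).foldl (fun lines i =>
        let row := ((PySem.List.pyGet? pattern (PySem.Int.mod i (pattern.length : Int))).getD "").toList
        let ot := gpB_scan row
        (PySem.List.pyRange 0 hauteur 1).foldl (fun ls j =>
            ot.1.foldl (fun ls off => ls ++ [gpB_line i (j * ot.2 + off)]) ls)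
          lines)
      ([] : List (List Char))).flatten)

-- ===== PRECONDITION & SPEC =====
-- Pre_ excludes empty pattern lists: there A raises ZeroDivisionError as soon as the two inner
-- loops run (largeur>0, hauteur>0), and the '' it returns when hauteur<=0 is an accident of the
-- modulo sitting inside the j-loop; B raises on every empty pattern with largeur>0.
def Pre_generatePattern2 (largeur : Int) (hauteur : Int) (pattern : List String) : Prop :=
  pattern ≠ [] ∨ largeur ≤ 0
instance (largeur : Int) (hauteur : Int) (pattern : List String) : Decidable (Pre_generatePattern2 largeur hauteur pattern) := by unfold Pre_generatePattern2; infer_instance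
def pvWitness_generatePattern2 : Int × Int × List String := (3, 2, ["xax", "x"])

def Spec_generatePattern2 (largeur : Int) (hauteur : Int) (pattern : List String) (out : String) : Prop := out = generatePattern2_alt largeur hauteur pattern
instance (largeur : Int) (hauteur : Int) (pattern : List String) (out : String) : Decidable (Spec_generatePattern2 largeur hauteur pattern out) := by unfold Spec_generatePattern2; infer_instance

-- ===== CLAIM (what is proved, stated in full; the proofs are below) =====
def Claim_equal_generatePattern2 : Prop := ∀ (largeur : Int) (hauteur : Int) (pattern : List String), Dom_generatePattern2 largeur hauteur pattern → Pre_generatePattern2 largeur hauteur pattern → Spec_generatePattern2 largeur hauteur pattern (generatePattern2 largeur hauteur pattern)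

-- ===== LEMMAS AND PROOFS =====

-- proof-side spec of the row scan started at absolute counter t
def offsAux : List Char → Int → List Int
  | [], _ => []
  | c :: cs, t => if c = 'x' then t :: offsAux cs (t + 2) else offsAux cs (t + 1)

def totAux : List Char → Int → Int
  | [], t => t
  | c :: cs, t => if c = 'x' then totAux cs (t + 2) else totAux cs (t + 1)

lemma scan_eq : ∀ (row : List Char) (os : List Int) (t : Int),
    row.foldl (fun st c => if c = 'x' then (st.1 ++ [st.2], st.2 + 2) else (st.1, st.2 + 1)) (os, t)
      = (os ++ offsAux row t, totAux row t) := by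
  intro row
  induction row with
  | nil => intro os t; simp [offsAux, totAux]
  | cons c cs ih =>
    intro os t
    by_cases hc : c = 'x' <;>
      simp [List.foldl_cons, hc, offsAux, totAux, ih]

lemma gpB_scan_eq (row : List Char) : gpB_scan row = (offsAux row 0, totAux row 0) := by
  simpa [gpB_scan] using scan_eq row [] 0

lemma gpA_char_fold (i : Int) : ∀ (row : List Char) (res : List Char) (n : Int),
    row.foldl (gpA_char i) (res, n)
      = (res ++ ((offsAux row n).map (gpB_line i)).flatten, totAux row n) := by
  intro row
  induction row with
  | nil => intro res n; simp [offsAux, totAux]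
  | cons c cs ih =>
    intro res n
    by_cases hc : c = 'x' <;>
      simp [List.foldl_cons, gpA_char, hc, offsAux, totAux, ih, gpB_line]

lemma aux_shift : ∀ (row : List Char) (d t : Int),
    offsAux row (d + t) = (offsAux row t).map (fun o => d + o) ∧ totAux row (d + t) = d + totAux row t := by
  intro row
  induction row with
  | nil => intro d t; simp [offsAux, totAux]
  | cons c cs ih =>
    intro d t
    by_cases hc : c = 'x'
    · have h2 : d + t + 2 = d + (t + 2) := by ring
      simp [offsAux, totAux, hc, h2, ih d (t + 2)]
    · have h1 : d + t + 1 = d + (t + 1) := by ring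
      simp [offsAux, totAux, hc, h1, ih d (t + 1)]

lemma foldl_append_singleton {α β : Type} (f : α → β) :
    ∀ (l : List α) (ls : List β), l.foldl (fun ls x => ls ++ [f x]) ls = ls ++ l.map f := by
  intro l
  induction l with
  | nil => simp
  | cons x xs ih => intro ls; simp [List.foldl_cons, ih]

-- the hauteur passes: A's running counter equals B's j*total bases
lemma pass_eq (i : Int) (row : List Char) :
    ∀ (cnt : Nat) (a : Int) (res : List Char) (ls : List (List Char)), res = ls.flatten →
      ((PySem.List.pyRange a (a + cnt) 1).foldl (fun st (_ : Int) => row.foldl (gpA_char i) st)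
          (res, a * (gpB_scan row).2)).1
        = ((PySem.List.pyRange a (a + cnt) 1).foldl (fun ls j =>
              (gpB_scan row).1.foldl (fun ls off => ls ++ [gpB_line i (j * (gpB_scan row).2 + off)]) ls)
            ls).flatten := by
  intro cnt
  induction cnt with
  | zero =>
    intro a res ls hres
    simp [hres]
  | succ k ih =>
    intro a res ls hres
    have hlt : a < a + (k + 1 : Nat) := by push_cast; omega
    rw [PySem.List.pyRange_one_cons hlt]
    have hrange : (a + 1) + (k : Int) = a + ((k + 1 : Nat) : Int) := by push_cast; ring
    simp only [List.foldl_cons]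
    rw [gpA_char_fold]
    have hoffs := (aux_shift row (a * (gpB_scan row).2) 0).1
    have htot := (aux_shift row (a * (gpB_scan row).2) 0).2
    rw [add_zero] at hoffs htot
    rw [gpB_scan_eq] at *
    simp only at *
    rw [hoffs, htot]
    have hstep : (a + 1) * totAux row 0 = a * totAux row 0 + totAux row 0 := by ring
    have := ih (a + 1)
      (res ++ (((offsAux row 0).map (fun o => a * totAux row 0 + o)).map (gpB_line i)).flatten)
      (ls ++ (offsAux row 0).map (fun off => gpB_line i (a * totAux row 0 + off)))
      (by simp [hres, List.map_map, Function.comp_def])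
    rw [hrange, hstep] at this
    rw [List.map_map] at this ⊢
    rw [foldl_append_singleton]
    exact this

-- the same from 0 to an arbitrary Int bound
lemma pass_eq_int (i : Int) (row : List Char) (h : Int) :
    ∀ (res : List Char) (ls : List (List Char)), res = ls.flatten →
      ((PySem.List.pyRange 0 h 1).foldl (fun st (_ : Int) => row.foldl (gpA_char i) st) (res, (0 : Int))).1
        = ((PySem.List.pyRange 0 h 1).foldl (fun ls j =>
              (gpB_scan row).1.foldl (fun ls off => ls ++ [gpB_line i (j * (gpB_scan row).2 + off)]) ls)
            ls).flatten := by
  intro res ls hres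
  by_cases hh : h ≤ 0
  · simp [PySem.List.pyRange_one_eq_nil hh, hres]
  · have hcast : h = 0 + (h.toNat : Int) := by omega
    have := pass_eq i row h.toNat 0 res ls hres
    rw [zero_mul] at this
    rw [hcast]
    exact this

-- the outer i-loop: A's string accumulator stays the flattening of B's line list
lemma outer_eq (hauteur : Int) (pattern : List String) :
    ∀ (l : List Int) (res : List Char) (ls : List (List Char)), res = ls.flatten →
      l.foldl (fun res i =>
          ((PySem.List.pyRange 0 hauteur 1).foldl (fun st (_ : Int) =>
              (((PySem.List.pyGet? pattern (PySem.Int.mod i (pattern.length : Int))).getD "").toList).foldl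
                (gpA_char i) st)
            (res, (0 : Int))).1) res
        = (l.foldl (fun lines i =>
            let row := ((PySem.List.pyGet? pattern (PySem.Int.mod i (pattern.length : Int))).getD "").toList
            let ot := gpB_scan row
            (PySem.List.pyRange 0 hauteur 1).foldl (fun ls j =>
                ot.1.foldl (fun ls off => ls ++ [gpB_line i (j * ot.2 + off)]) ls)
              lines) ls).flatten := by
  intro l
  induction l with
  | nil => intro res ls hres; simpa using hres
  | cons i is ih =>
    intro res ls hres
    simp only [List.foldl_cons]
    exact ih _ _ (pass_eq_int i _ hauteur res ls hres)

-- ===== VERDICT (by name: the statement is the Claim_ definition above) =====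
theorem generatePattern2_spec : Claim_equal_generatePattern2 := by
  intro largeur hauteur pattern _ _
  unfold Spec_generatePattern2 generatePattern2 generatePattern2_alt
  exact congrArg String.ofList (outer_eq hauteur pattern (PySem.List.pyRange 0 largeur 1) [] [] rfl)
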